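-- pv_equiv track=rewrite | github.com/ChickChicky/switch8 | solve.py | get_moves_part
-- ===== SOURCE A (Python) =====
-- board:  list[int] = [ 1, 1, 1, 1, 0, 2, 2, 2, 2 ]
--
-- def get_moves_part(board:list[int]) -> list[(int,int)]:
--     moves: list[(int,int)] = []
--     for i, p in enumerate(board):
--         if p == 1 and i < len(board)-1:
--             if board[i+1] == 0:
--                 moves.append((i,i+1))
--             elif i < len(board)-2 and board[i+1] == 2 and board[i+2] == 0:
--                 moves.append((i,i+2))
--     return moves
-- ===== SOURCE B (Python) =====
-- def _merge(steps, jumps):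
--     out = []
--     a = 0
--     b = 0
--     while a < len(steps) and b < len(jumps):
--         if steps[a][0] < jumps[b][0]:
--             out.append(steps[a])
--             a += 1
--         else:
--             out.append(jumps[b])
--             b += 1
--     out.extend(steps[a:])
--     out.extend(jumps[b:])
--     return out
--
-- def get_moves_part(board: list[int]) -> list[(int, int)]:
--     n = len(board)
--     steps = [(i, i + 1) for i in range(n - 1)
--              if board[i] == 1 and board[i + 1] == 0]
--     jumps = [(i, i + 2) for i in range(n - 2)
--              if board[i] == 1 and board[i + 1] == 2 and board[i + 2] == 0]
--     return _merge(steps, jumps)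
-- ===== Notes on version B (the rewrite author's own statement) =====
-- stated objective: alternative
-- what changed: B works in three stages instead of A's single conditional scan: one comprehension collects all step moves, a second collects all jump moves, and a recursive two-pointer merge on the source index interleaves them; this yields A's order because step and jump conditions are mutually exclusive at each index and both lists are sorted by source.
import Mathlib
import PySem

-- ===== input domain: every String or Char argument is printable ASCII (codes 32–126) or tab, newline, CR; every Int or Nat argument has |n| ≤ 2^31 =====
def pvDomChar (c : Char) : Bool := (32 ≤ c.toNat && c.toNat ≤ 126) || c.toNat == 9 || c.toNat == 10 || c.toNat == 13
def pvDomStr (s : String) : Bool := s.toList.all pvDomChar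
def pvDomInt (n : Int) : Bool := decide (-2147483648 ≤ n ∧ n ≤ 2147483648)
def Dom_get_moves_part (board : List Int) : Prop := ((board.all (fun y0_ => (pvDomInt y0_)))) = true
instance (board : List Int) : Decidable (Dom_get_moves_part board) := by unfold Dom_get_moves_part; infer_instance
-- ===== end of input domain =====

-- B builds the step moves and the jump moves in two separate comprehensions and merges the
-- two sorted lists by source index (alternative staged decomposition; same result and order).

-- ===== PORT A =====
def get_moves_part (board : List Int) : List (Int × Int) :=
  (PySem.List.enumerate board).foldl (fun moves ip =>
    if ip.2 = 1 ∧ ip.1 < (board.length : Int) - 1 then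
      if PySem.List.pyGetD board (ip.1 + 1) 0 = 0 then moves ++ [(ip.1, ip.1 + 1)]
      else if ip.1 < (board.length : Int) - 2 ∧ PySem.List.pyGetD board (ip.1 + 1) 0 = 2
              ∧ PySem.List.pyGetD board (ip.1 + 2) 0 = 0 then moves ++ [(ip.1, ip.1 + 2)]
      else moves
    else moves) []

-- ===== PORT B =====
-- _merge of Source B: recursive two-pointer merge of two lists of moves by source index
def pvMergeB : List (Int × Int) → List (Int × Int) → List (Int × Int)
  | [], ys => ys
  | x :: xs, [] => x :: xs
  | x :: xs, y :: ys =>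
    if x.1 < y.1 then x :: pvMergeB xs (y :: ys) else y :: pvMergeB (x :: xs) ys
termination_by xs ys => xs.length + ys.length

def get_moves_part_alt (board : List Int) : List (Int × Int) :=
  let n : Int := board.length
  let steps := ((PySem.List.pyRange 0 (n - 1) 1).filter (fun i =>
      PySem.List.pyGetD board i 0 == 1 && PySem.List.pyGetD board (i + 1) 0 == 0)).map
      (fun i => (i, i + 1))
  let jumps := ((PySem.List.pyRange 0 (n - 2) 1).filter (fun i =>
      PySem.List.pyGetD board i 0 == 1 && PySem.List.pyGetD board (i + 1) 0 == 2
        && PySem.List.pyGetD board (i + 2) 0 == 0)).map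
      (fun i => (i, i + 2))
  pvMergeB steps jumps

-- ===== PRECONDITION & SPEC =====
def Spec_get_moves_part (board : List Int) (out : List (Int × Int)) : Prop := out = get_moves_part_alt board
instance (board : List Int) (out : List (Int × Int)) : Decidable (Spec_get_moves_part board out) := by unfold Spec_get_moves_part; infer_instance

-- ===== CLAIM (what is proved, stated in full; the proofs are below) =====
def Claim_equal_get_moves_part : Prop := ∀ (board : List Int), Dom_get_moves_part board → Spec_get_moves_part board (get_moves_part board)

-- ===== LEMMAS AND PROOFS =====

-- the move emitted with source at position k, given the cell x at k and the cells after it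
def pvEmit (k : Nat) (x : Int) : List Int → List (Int × Int)
  | [] => []
  | [y] => if x = 1 ∧ y = 0 then [((k : Int), (k : Int) + 1)] else []
  | y :: z :: _ =>
    if x = 1 ∧ y = 0 then [((k : Int), (k : Int) + 1)]
    else if x = 1 ∧ y = 2 ∧ z = 0 then [((k : Int), (k : Int) + 2)]
    else []

-- all moves whose source lies in the suffix s that starts at position k
def pvM (k : Nat) : List Int → List (Int × Int)
  | [] => []
  | x :: rest => pvEmit k x rest ++ pvM (k + 1) rest

-- the step move (resp. jump move) emitted at position k, separately
def pvStepE (k : Nat) (x : Int) : List Int → List (Int × Int)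
  | [] => []
  | y :: _ => if x = 1 ∧ y = 0 then [((k : Int), (k : Int) + 1)] else []

def pvJumpE (k : Nat) (x : Int) : List Int → List (Int × Int)
  | y :: z :: _ => if x = 1 ∧ y = 2 ∧ z = 0 then [((k : Int), (k : Int) + 2)] else []
  | _ => []

def pvSteps (k : Nat) : List Int → List (Int × Int)
  | [] => []
  | x :: r => pvStepE k x r ++ pvSteps (k + 1) r

def pvJumps (k : Nat) : List Int → List (Int × Int)
  | [] => []
  | x :: r => pvJumpE k x r ++ pvJumps (k + 1) r

lemma pvGetFwd (pre s : List Int) (c : Nat) :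
    PySem.List.pyGetD (pre ++ s) ((pre.length : Int) + (c : Int)) 0 = s.getD c 0 := by
  have h : (pre.length : Int) + (c : Int) = ((pre.length + c : Nat) : Int) := by push_cast; ring
  rw [h, PySem.List.pyGetD_natCast]
  rw [List.getD_eq_getElem?_getD, List.getD_eq_getElem?_getD,
    List.getElem?_append_right (by omega : pre.length ≤ pre.length + c)]
  congr 2
  omega

lemma pvStepA (pre : List Int) (x : Int) (rest : List Int) (acc : List (Int × Int)) :
    (if x = 1 ∧ (pre.length : Int) < (pre.length : Int) + ((rest.length : Int) + 1) - 1 then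
      if PySem.List.pyGetD (pre ++ x :: rest) ((pre.length : Int) + 1) 0 = 0 then
        acc ++ [((pre.length : Int), (pre.length : Int) + 1)]
      else if (pre.length : Int) < (pre.length : Int) + ((rest.length : Int) + 1) - 2
              ∧ PySem.List.pyGetD (pre ++ x :: rest) ((pre.length : Int) + 1) 0 = 2
              ∧ PySem.List.pyGetD (pre ++ x :: rest) ((pre.length : Int) + 2) 0 = 0 then
        acc ++ [((pre.length : Int), (pre.length : Int) + 2)]
      else acc
    else acc) = acc ++ pvEmit pre.length x rest := by
  have g1 : PySem.List.pyGetD (pre ++ x :: rest) ((pre.length : Int) + 1) 0 = (x :: rest).getD 1 0 := by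
    simpa using pvGetFwd pre (x :: rest) 1
  have g2 : PySem.List.pyGetD (pre ++ x :: rest) ((pre.length : Int) + 2) 0 = (x :: rest).getD 2 0 := by
    simpa using pvGetFwd pre (x :: rest) 2
  rcases rest with _ | ⟨y, rest1⟩
  · simp only [pvEmit]
    rw [if_neg (by simp only [List.length_nil, Nat.cast_zero]; omega)]
    simp
  · rcases rest1 with _ | ⟨z, rest2⟩
    · simp only [g1, g2, List.getD, pvEmit] at *
      simp only [List.getElem?_cons_succ, List.getElem?_cons_zero, Option.getD_some] at *
      split_ifs with h1 h2 h3 <;> simp_all <;> omega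
    · simp only [g1, g2, List.getD, pvEmit] at *
      simp only [List.getElem?_cons_succ, List.getElem?_cons_zero, Option.getD_some] at *
      split_ifs with h1 h2 h3 h4 h5 <;> simp_all <;> omega

lemma pvA_loop (board : List Int) :
    ∀ (s pre : List Int), board = pre ++ s → ∀ (acc : List (Int × Int)),
    (PySem.List.enumerate s ((pre.length : Nat) : Int)).foldl (fun moves ip =>
      if ip.2 = 1 ∧ ip.1 < (board.length : Int) - 1 then
        if PySem.List.pyGetD board (ip.1 + 1) 0 = 0 then moves ++ [(ip.1, ip.1 + 1)]
        else if ip.1 < (board.length : Int) - 2 ∧ PySem.List.pyGetD board (ip.1 + 1) 0 = 2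
                ∧ PySem.List.pyGetD board (ip.1 + 2) 0 = 0 then moves ++ [(ip.1, ip.1 + 2)]
        else moves
      else moves) acc
    = acc ++ pvM pre.length s := by
  intro s
  induction s with
  | nil =>
    intro pre h acc
    simp [pvM, PySem.List.enumerate_nil]
  | cons x rest ih =>
    intro pre hb acc
    subst hb
    rw [PySem.List.enumerate_cons, List.foldl_cons]
    have ih' := ih (pre ++ [x]) (by simp)
    simp only [List.length_append, List.length_cons, List.length_nil, Nat.cast_add,
      Nat.cast_one, Nat.zero_add] at ih' ⊢
    rw [ih', pvStepA]
    simp [pvM, List.append_assoc]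

-- pvEmit splits into the (mutually exclusive) step and jump emissions
lemma pvEmit_eq (k : Nat) (x : Int) (rest : List Int) :
    pvEmit k x rest = pvStepE k x rest ++ pvJumpE k x rest := by
  rcases rest with _ | ⟨y, _ | ⟨z, r⟩⟩
  · rfl
  · simp only [pvEmit, pvStepE, pvJumpE]; split_ifs <;> simp
  · simp only [pvEmit, pvStepE, pvJumpE]
    split_ifs <;> (try (exfalso; omega)) <;> simp

lemma pvEmit_cases (k : Nat) (x : Int) (rest : List Int) :
    (pvStepE k x rest = [] ∧ pvJumpE k x rest = [])
    ∨ (pvStepE k x rest = [((k : Int), (k : Int) + 1)] ∧ pvJumpE k x rest = [])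
    ∨ (pvStepE k x rest = [] ∧ pvJumpE k x rest = [((k : Int), (k : Int) + 2)]) := by
  rcases rest with _ | ⟨y, _ | ⟨z, r⟩⟩
  · simp [pvStepE, pvJumpE]
  · simp only [pvStepE, pvJumpE]; split_ifs <;> simp
  · simp only [pvStepE, pvJumpE]
    split_ifs <;> (try (exfalso; omega)) <;> simp

lemma pvSteps_key : ∀ (s : List Int) (k : Nat) (p : Int × Int), p ∈ pvSteps k s → (k : Int) ≤ p.1 := by
  intro s
  induction s with
  | nil => intro k p hp; simp [pvSteps] at hp
  | cons x r ih =>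
    intro k p hp
    simp only [pvSteps, List.mem_append] at hp
    rcases hp with hp | hp
    · rcases r with _ | ⟨y, t⟩ <;> simp only [pvStepE] at hp
      · simp at hp
      · split_ifs at hp <;> simp_all
    · have := ih (k + 1) p hp
      push_cast at this ⊢
      omega

lemma pvJumps_key : ∀ (s : List Int) (k : Nat) (p : Int × Int), p ∈ pvJumps k s → (k : Int) ≤ p.1 := by
  intro s
  induction s with
  | nil => intro k p hp; simp [pvJumps] at hp
  | cons x r ih =>
    intro k p hp
    simp only [pvJumps, List.mem_append] at hp
    rcases hp with hp | hp
    · rcases r with _ | ⟨y, _ | ⟨z, t⟩⟩ <;> simp only [pvJumpE] at hp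
      · simp at hp
      · simp at hp
      · split_ifs at hp <;> simp_all
    · have := ih (k + 1) p hp
      push_cast at this ⊢
      omega

lemma pvMergeB_nil_right (xs : List (Int × Int)) : pvMergeB xs [] = xs := by
  cases xs <;> simp [pvMergeB]

lemma pvMergeB_cons_left (x : Int × Int) (xs ys : List (Int × Int))
    (h : ∀ p ∈ ys, x.1 < p.1) : pvMergeB (x :: xs) ys = x :: pvMergeB xs ys := by
  cases ys with
  | nil => rw [pvMergeB_nil_right, pvMergeB_nil_right]
  | cons y ys =>
    simp only [pvMergeB]
    rw [if_pos (h y (List.mem_cons_self))]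

lemma pvMergeB_cons_right (y : Int × Int) (xs ys : List (Int × Int))
    (h : ∀ p ∈ xs, y.1 < p.1) : pvMergeB xs (y :: ys) = y :: pvMergeB xs ys := by
  cases xs with
  | nil => simp [pvMergeB]
  | cons x xs =>
    simp only [pvMergeB]
    rw [if_neg (by have := h x (List.mem_cons_self); omega)]

lemma pvM_merge : ∀ (s : List Int) (k : Nat), pvM k s = pvMergeB (pvSteps k s) (pvJumps k s) := by
  intro s
  induction s with
  | nil => intro k; simp [pvM, pvSteps, pvJumps, pvMergeB]
  | cons x r ih =>
    intro k
    have hkS : ∀ p ∈ pvSteps (k + 1) r, (k : Int) < p.1 := by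
      intro p hp
      have := pvSteps_key r (k + 1) p hp
      push_cast at this; omega
    have hkJ : ∀ p ∈ pvJumps (k + 1) r, (k : Int) < p.1 := by
      intro p hp
      have := pvJumps_key r (k + 1) p hp
      push_cast at this; omega
    simp only [pvM, pvSteps, pvJumps, pvEmit_eq, ih (k + 1)]
    rcases pvEmit_cases k x r with ⟨h1, h2⟩ | ⟨h1, h2⟩ | ⟨h1, h2⟩ <;> rw [h1, h2]
    · simp
    · simp only [List.nil_append, List.singleton_append]
      rw [pvMergeB_cons_left _ _ _ (by intro p hp; exact hkJ p hp)]
    · simp only [List.nil_append, List.singleton_append]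
      rw [pvMergeB_cons_right _ _ _ (by intro p hp; exact hkS p hp)]

-- the steps comprehension over the index range equals the structural pvSteps
lemma pvStepsRange : ∀ (s pre : List Int),
    (((PySem.List.pyRange (pre.length : Int) ((pre.length : Int) + (s.length : Int) - 1) 1).filter
        (fun i => PySem.List.pyGetD (pre ++ s) i 0 == 1
          && PySem.List.pyGetD (pre ++ s) (i + 1) 0 == 0)).map (fun i => (i, i + 1)))
    = pvSteps pre.length s := by
  intro s
  induction s with
  | nil =>
    intro pre
    rw [PySem.List.pyRange_one_eq_nil (by simp only [List.length_nil]; push_cast; omega)]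
    rfl
  | cons x rest ih =>
    intro pre
    rcases rest with _ | ⟨y, t⟩
    · rw [PySem.List.pyRange_one_eq_nil
          (by simp only [List.length_cons, List.length_nil]; push_cast; omega)]
      simp [pvSteps, pvStepE]
    · have g0 : PySem.List.pyGetD (pre ++ x :: y :: t) ((pre.length : Int)) 0 = x := by
        simpa using pvGetFwd pre (x :: y :: t) 0
      have g1 : PySem.List.pyGetD (pre ++ x :: y :: t) ((pre.length : Int) + 1) 0 = y := by
        simpa using pvGetFwd pre (x :: y :: t) 1
      have hlt : (pre.length : Int) < (pre.length : Int) + (((x :: y :: t).length : Int)) - 1 := by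
        simp only [List.length_cons]; push_cast; omega
      rw [PySem.List.pyRange_one_cons hlt, List.filter_cons]
      have ih' := ih (pre ++ [x])
      simp only [List.length_append, List.length_cons, List.length_nil, Nat.cast_add,
        Nat.cast_one, Nat.cast_zero, zero_add, List.append_assoc, List.cons_append,
        List.nil_append] at ih' ⊢
      ring_nf at g1 ih' ⊢
      simp only [g0, g1]
      simp only [pvSteps, pvStepE]
      by_cases hc : x = 1 ∧ y = 0
      · rw [if_pos (by simp only [Bool.and_eq_true, beq_iff_eq]; exact hc), if_pos hc,
          List.map_cons, ih']
        simp [pvSteps, pvStepE, pvJumps, pvJumpE, Nat.add_comm, Nat.cast_add, Nat.cast_one]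
        try omega
      · rw [if_neg (by simp only [Bool.and_eq_true, beq_iff_eq]; exact hc), if_neg hc, ih']
        simp [pvSteps, pvStepE, pvJumps, pvJumpE, Nat.add_comm, Nat.cast_add, Nat.cast_one]
        try omega

-- the jumps comprehension over the index range equals the structural pvJumps
lemma pvJumpsRange : ∀ (s pre : List Int),
    (((PySem.List.pyRange (pre.length : Int) ((pre.length : Int) + (s.length : Int) - 2) 1).filter
        (fun i => PySem.List.pyGetD (pre ++ s) i 0 == 1
          && PySem.List.pyGetD (pre ++ s) (i + 1) 0 == 2
          && PySem.List.pyGetD (pre ++ s) (i + 2) 0 == 0)).map (fun i => (i, i + 2)))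
    = pvJumps pre.length s := by
  intro s
  induction s with
  | nil =>
    intro pre
    rw [PySem.List.pyRange_one_eq_nil (by simp only [List.length_nil]; push_cast; omega)]
    rfl
  | cons x rest ih =>
    intro pre
    rcases rest with _ | ⟨y, _ | ⟨z, t⟩⟩
    · rw [PySem.List.pyRange_one_eq_nil
          (by simp only [List.length_cons, List.length_nil]; push_cast; omega)]
      simp [pvJumps, pvJumpE]
    · rw [PySem.List.pyRange_one_eq_nil
          (by simp only [List.length_cons, List.length_nil]; push_cast; omega)]
      simp [pvJumps, pvJumpE]
    · have g0 : PySem.List.pyGetD (pre ++ x :: y :: z :: t) ((pre.length : Int)) 0 = x := by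
        simpa using pvGetFwd pre (x :: y :: z :: t) 0
      have g1 : PySem.List.pyGetD (pre ++ x :: y :: z :: t) ((pre.length : Int) + 1) 0 = y := by
        simpa using pvGetFwd pre (x :: y :: z :: t) 1
      have g2 : PySem.List.pyGetD (pre ++ x :: y :: z :: t) ((pre.length : Int) + 2) 0 = z := by
        simpa using pvGetFwd pre (x :: y :: z :: t) 2
      have hlt : (pre.length : Int) < (pre.length : Int) + (((x :: y :: z :: t).length : Int)) - 2 := by
        simp only [List.length_cons]; push_cast; omega
      rw [PySem.List.pyRange_one_cons hlt, List.filter_cons]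
      have ih' := ih (pre ++ [x])
      simp only [List.length_append, List.length_cons, List.length_nil, Nat.cast_add,
        Nat.cast_one, Nat.cast_zero, zero_add, List.append_assoc, List.cons_append,
        List.nil_append] at ih' ⊢
      ring_nf at g1 g2 ih' ⊢
      simp only [g0, g1, g2]
      simp only [pvJumps, pvJumpE]
      by_cases hc : x = 1 ∧ y = 2 ∧ z = 0
      · rw [if_pos (by simp only [Bool.and_eq_true, beq_iff_eq]; exact ⟨⟨hc.1, hc.2.1⟩, hc.2.2⟩),
          if_pos hc, List.map_cons, ih']
        simp [pvSteps, pvStepE, pvJumps, pvJumpE, Nat.add_comm, Nat.cast_add, Nat.cast_one]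
        try omega
      · rw [if_neg (by simp only [Bool.and_eq_true, beq_iff_eq, and_assoc]; exact hc),
          if_neg hc, ih']
        simp [pvSteps, pvStepE, pvJumps, pvJumpE, Nat.add_comm, Nat.cast_add, Nat.cast_one]
        try omega

-- ===== VERDICT (by name: the statement is the Claim_ definition above) =====
theorem get_moves_part_spec : Claim_equal_get_moves_part := by
  intro board _
  unfold Spec_get_moves_part get_moves_part get_moves_part_alt
  have hA := pvA_loop board board [] (by simp) []
  simp only [List.length_nil, Nat.cast_zero, List.nil_append] at hA
  rw [hA]
  have hS := pvStepsRange board []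
  have hJ := pvJumpsRange board []
  simp only [List.length_nil, Nat.cast_zero, List.nil_append, zero_add] at hS hJ
  simp only []
  rw [hS, hJ, pvM_merge board 0]
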